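-- pv_equiv track=rewrite | github.com/MdAminourIslam/LeetCode-Solutions | LeetCode_717/Main.py | isOneBitCharacter
-- ===== SOURCE A (Python) =====
-- from typing import List
--
-- def isOneBitCharacter(bits: List[int]) -> bool:
--     n = len(bits) - 1
--     indx = 0
--     while indx < n:
--         if indx + 1 < n:
--             if bits[indx] == 0:
--                 indx += 1
--             else:
--                 indx += 2
--         else:
--             if bits[indx] == 1:
--                 return False
--             else:
--                 return True
--     return True
-- ===== SOURCE B (Python) =====
-- def isOneBitCharacter(bits):
--     # Right-to-left scan: count the run of nonzero entries ending at index len-3.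
--     # The greedy decode lands on the second-to-last slot iff that run has even
--     # length; there the answer is bits[-2] != 1, otherwise it is True.
--     if len(bits) < 2:
--         return True
--     i = len(bits) - 3
--     k = 0
--     while i >= 0 and bits[i] != 0:
--         k += 1
--         i -= 1
--     return k % 2 == 1 or bits[-2] != 1
-- ===== Notes on version B (the rewrite author's own statement) =====
-- stated objective: alternative
-- what changed: Replaces the forward greedy decode (pointer stepping 1 or 2 per symbol) with a single right-to-left scan that counts the run of nonzero entries before the second-to-last slot and decides by its parity.
import Mathlib
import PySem

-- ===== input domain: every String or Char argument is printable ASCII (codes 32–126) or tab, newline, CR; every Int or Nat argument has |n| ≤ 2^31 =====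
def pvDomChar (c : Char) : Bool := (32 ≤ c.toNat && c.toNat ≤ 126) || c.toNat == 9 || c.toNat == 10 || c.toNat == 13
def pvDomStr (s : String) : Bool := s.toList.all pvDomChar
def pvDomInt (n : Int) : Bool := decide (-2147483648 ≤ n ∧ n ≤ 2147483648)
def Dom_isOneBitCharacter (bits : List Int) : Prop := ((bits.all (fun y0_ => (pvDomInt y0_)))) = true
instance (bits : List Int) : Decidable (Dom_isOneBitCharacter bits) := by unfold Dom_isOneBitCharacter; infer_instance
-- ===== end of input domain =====

-- B replaces A's forward greedy decode by a right-to-left scan counting the run of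
-- nonzero entries before the second-to-last slot, deciding by its parity (alternative
-- single-pass algorithm, same cost).

-- ===== PORT A =====
-- A's while loop; indx always stays in [0, n) at each access, so the `some`
-- comparisons against the Option returned by pyGet? are exact (pyGet? never
-- returns none on a reachable access).
def isOneBitCharacterGo (bits : List Int) (n indx : Int) : Bool :=
  if h : indx < n then
    if indx + 1 < n then
      if PySem.List.pyGet? bits indx = some 0 then
        isOneBitCharacterGo bits n (indx + 1)
      else
        isOneBitCharacterGo bits n (indx + 2)
    else
      if PySem.List.pyGet? bits indx = some 1 then false else true
  else true
termination_by (n - indx).toNat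
decreasing_by all_goals omega

def isOneBitCharacter (bits : List Int) : Bool :=
  isOneBitCharacterGo bits ((bits.length : Int) - 1) 0

-- ===== PORT B =====
-- B's while loop: `while i >= 0 and bits[i] != 0: k += 1; i -= 1`; every access
-- has 0 ≤ i < len bits, so pyGet? is exact here too.
def isOneBitCharacterAltGo (bits : List Int) (i k : Int) : Int :=
  if h : 0 ≤ i ∧ PySem.List.pyGet? bits i ≠ some 0 then
    isOneBitCharacterAltGo bits (i - 1) (k + 1)
  else k
termination_by (i + 1).toNat
decreasing_by omega

def isOneBitCharacter_alt (bits : List Int) : Bool :=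
  if (bits.length : Int) < 2 then true
  else
    let k := isOneBitCharacterAltGo bits ((bits.length : Int) - 3) 0
    (PySem.Int.mod k 2 == 1) || !(PySem.List.pyGet? bits (-2) == some 1)

-- ===== PRECONDITION & SPEC =====
def Spec_isOneBitCharacter (bits : List Int) (out : Bool) : Prop := out = isOneBitCharacter_alt bits
instance (bits : List Int) (out : Bool) : Decidable (Spec_isOneBitCharacter bits out) := by unfold Spec_isOneBitCharacter; infer_instance

-- ===== CLAIM (what is proved, stated in full; the proofs are below) =====
def Claim_equal_isOneBitCharacter : Prop := ∀ (bits : List Int), Dom_isOneBitCharacter bits → Spec_isOneBitCharacter bits (isOneBitCharacter bits)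

-- ===== LEMMAS AND PROOFS =====

-- length of the run of nonzero values at the front of a list
def cntF (l : List Int) : Nat := (l.takeWhile (fun v => decide (v ≠ 0))).length

-- the common closed form both programs are reduced to
def gForm (bits : List Int) : Bool :=
  if bits.length < 2 then true
  else (cntF ((bits.reverse).drop 2) % 2 == 1) || !(PySem.List.pyGet? bits (-2) == some 1)

lemma cntF_append_zero (u : List Int) : cntF (u ++ [0]) = cntF u := by
  induction u with
  | nil => simp [cntF]
  | cons a u ih =>
      by_cases ha : a = 0
      · simp [cntF, ha, List.takeWhile]
      · simp [cntF, ha, List.takeWhile]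
        simpa [cntF] using ih

lemma cntF_cons_ne (a : Int) (ha : a ≠ 0) (l : List Int) : cntF (a :: l) = cntF l + 1 := by
  simp [cntF, ha]

lemma cntF_cons_zero (l : List Int) : cntF ((0 : Int) :: l) = 0 := by
  simp [cntF]

lemma cntF_parity (u : List Int) (x : Int) (hu : u ≠ []) (hx : x ≠ 0) :
    cntF (u ++ [x]) % 2 = cntF u.dropLast % 2 := by
  induction u with
  | nil => simp at hu
  | cons a u ih =>
      by_cases ha : a = 0
      · subst ha
        cases u with
        | nil => simp [cntF]
        | cons b u =>
            rw [List.cons_append, cntF_cons_zero,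
              List.dropLast_cons_of_ne_nil (List.cons_ne_nil b u), cntF_cons_zero]
      · cases u with
        | nil => simp [cntF, ha, hx]
        | cons b u =>
            have h := ih (by simp)
            rw [List.cons_append, cntF_cons_ne a ha,
              List.dropLast_cons_of_ne_nil (List.cons_ne_nil b u), cntF_cons_ne a ha]
            omega

lemma aGo_shift (x : Int) (bits : List Int) (n i : Int) (hi : 0 ≤ i) :
    isOneBitCharacterGo (x :: bits) n (i + 1) = isOneBitCharacterGo bits (n - 1) i := by
  generalize hf : (n - i).toNat = f
  induction f using Nat.strong_induction_on generalizing i with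
  | _ f ih =>
  have hget : PySem.List.pyGet? (x :: bits) (i + 1) = PySem.List.pyGet? bits i := by
    obtain ⟨j, rfl⟩ : ∃ j : Nat, i = (j : Int) := ⟨i.toNat, by omega⟩
    rw [show (j : Int) + 1 = ((j + 1 : Nat) : Int) by push_cast; ring]
    simp [PySem.List.pyGet?_natCast]
  conv_lhs => rw [isOneBitCharacterGo]
  conv_rhs => rw [isOneBitCharacterGo]
  by_cases h1 : i < n - 1
  · have h1' : i + 1 < n := by omega
    rw [dif_pos h1', dif_pos h1]
    by_cases h2 : i + 1 < n - 1
    · have h2' : i + 1 + 1 < n := by omega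
      rw [if_pos h2', if_pos h2, hget]
      by_cases h0 : PySem.List.pyGet? bits i = some 0
      · rw [if_pos h0, if_pos h0, show i + 1 + 1 = (i + 1) + 1 by ring]
        exact ih (n - i - 1).toNat (by omega) (i + 1) (by omega) (by omega)
      · rw [if_neg h0, if_neg h0, show i + 1 + 2 = (i + 2) + 1 by ring]
        exact ih (n - i - 2).toNat (by omega) (i + 2) (by omega) (by omega)
    · have h2' : ¬ (i + 1 + 1 < n) := by omega
      rw [if_neg h2', if_neg h2, hget]
  · have h1' : ¬ (i + 1 < n) := by omega
    rw [dif_neg h1', dif_neg h1]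

lemma bGo_cnt (bits : List Int) (j : Nat) (hj : j ≤ bits.length) (k : Int) :
    isOneBitCharacterAltGo bits ((j : Int) - 1) k = k + (cntF ((bits.take j).reverse) : Int) := by
  induction j generalizing k with
  | zero =>
      rw [isOneBitCharacterAltGo]
      simp [cntF]
  | succ j ih =>
      rw [isOneBitCharacterAltGo]
      have hjl : j < bits.length := by omega
      have hget : PySem.List.pyGet? bits ((j : Int) + 1 - 1) = some bits[j] := by
        rw [show (j : Int) + 1 - 1 = (j : Int) by ring]
        simp [hjl]
      have htake : (bits.take (j + 1)).reverse = bits[j] :: (bits.take j).reverse := by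
        rw [List.take_add_one]
        simp [hjl]
      push_cast
      rw [show ((j : Int) + 1 - 1) = (j : Int) + 1 - 1 from rfl]
      by_cases hz : bits[j] = 0
      · have : ¬ (0 ≤ (j : Int) + 1 - 1 ∧ PySem.List.pyGet? bits ((j : Int) + 1 - 1) ≠ some 0) := by
          simp [List.getElem?_eq_getElem hjl, hz]
        rw [dif_neg this, htake]
        simp [cntF, List.takeWhile, hz]
      · have hcond : (0 ≤ (j : Int) + 1 - 1 ∧ PySem.List.pyGet? bits ((j : Int) + 1 - 1) ≠ some 0) := by
          constructor
          · omega
          · simp [List.getElem?_eq_getElem hjl, hz]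
        rw [dif_pos hcond]
        rw [show (j : Int) + 1 - 1 - 1 = (j : Int) - 1 by ring]
        rw [ih (by omega)]
        rw [htake]
        simp [cntF, List.takeWhile, hz]
        ring

-- gForm is unchanged by removing a leading 0 (when at least two elements remain)
lemma gForm_cons_zero (l : List Int) (hl : 2 ≤ l.length) :
    gForm ((0 : Int) :: l) = gForm l := by
  have h1 : ¬ ((0 : Int) :: l).length < 2 := by simp only [List.length_cons]; omega
  have h2 : ¬ l.length < 2 := by omega
  have hd : (((0 : Int) :: l).reverse).drop 2 = (l.reverse.drop 2) ++ [0] := by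
    rw [List.reverse_cons, List.drop_append_of_le_length (by simpa using hl)]
  have hg : PySem.List.pyGet? ((0 : Int) :: l) (-2) = PySem.List.pyGet? l (-2) := by
    rw [PySem.List.pyGet?_neg_ofNat _ 2 (by omega) (by simp only [List.length_cons]; omega),
      PySem.List.pyGet?_neg_ofNat _ 2 (by omega) (by omega)]
    obtain ⟨m, hm⟩ : ∃ m, l.length = m + 2 := ⟨l.length - 2, by omega⟩
    simp [hm]
  rw [gForm, gForm, if_neg h1, if_neg h2, hd, cntF_append_zero, hg]

-- gForm drops a leading nonzero element together with its successor
lemma gForm_cons_ne (x y : Int) (l : List Int) (hx : x ≠ 0) (hl : l ≠ []) :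
    gForm (x :: y :: l) = gForm l := by
  rcases l with _ | ⟨r, l⟩
  · simp at hl
  rcases l with _ | ⟨s, l⟩
  · -- the tail is a single element: both sides are true
    rw [gForm, gForm]
    simp [cntF, hx]
  · -- the tail has length ≥ 2
    set t := r :: s :: l with ht
    have hlen : 2 ≤ t.length := by simp [ht]
    have h1 : ¬ (x :: y :: t).length < 2 := by simp
    have h2 : ¬ t.length < 2 := by omega
    have hd : ((x :: y :: t).reverse).drop 2 = ((t.reverse.drop 2) ++ [y]) ++ [x] := by
      rw [List.reverse_cons, List.reverse_cons,
        List.drop_append_of_le_length (by simp [ht]),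
        List.drop_append_of_le_length (by simpa using hlen)]
    have hpar : cntF (((t.reverse.drop 2) ++ [y]) ++ [x]) % 2 = cntF (t.reverse.drop 2) % 2 := by
      rw [cntF_parity _ x (by simp) hx, List.dropLast_concat]
    have hg : PySem.List.pyGet? (x :: y :: t) (-2) = PySem.List.pyGet? t (-2) := by
      rw [PySem.List.pyGet?_neg_ofNat _ 2 (by omega) (by simp),
        PySem.List.pyGet?_neg_ofNat _ 2 (by omega) (by omega)]
      obtain ⟨m, hm⟩ : ∃ m, t.length = m + 2 := ⟨t.length - 2, by omega⟩
      have hLm : (x :: y :: t).length - 2 = m + 2 := by simp [hm]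
      rw [hLm, hm]
      simp
    rw [gForm, gForm, if_neg h1, if_neg h2, hd, hg, hpar]

lemma a_small (bits : List Int) (h : bits.length ≤ 1) : isOneBitCharacter bits = true := by
  rw [isOneBitCharacter, isOneBitCharacterGo, dif_neg (by omega)]

-- A equals the closed form, by strong induction on the list length
lemma a_eq_gForm (bits : List Int) : isOneBitCharacter bits = gForm bits := by
  suffices H : ∀ (n : ℕ) (bits : List Int), bits.length = n → isOneBitCharacter bits = gForm bits from
    H bits.length bits rfl
  intro n
  induction n using Nat.strong_induction_on with
  | _ n ih =>
  intro bits hn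
  rcases bits with _ | ⟨x, bits⟩
  · rw [a_small [] (by simp), gForm]; simp
  rcases bits with _ | ⟨y, rest⟩
  · rw [a_small [x] (by simp), gForm]; simp
  rcases rest with _ | ⟨z, rest⟩
  · -- two elements
    have hg : PySem.List.pyGet? [x, y] (-2) = some x := by
      rw [PySem.List.pyGet?_neg_ofNat _ 2 (by omega) (by simp)]
      simp
    rw [isOneBitCharacter, isOneBitCharacterGo, gForm,
      show (([x, y] : List Int).length : Int) - 1 = 1 by simp,
      dif_pos (by omega), if_neg (by omega), PySem.List.pyGet?_zero_cons]
    by_cases hx1 : x = 1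
    · subst hx1; simp [cntF, hg]
    · simp [cntF, hg, hx1]
  · -- at least three elements
    simp only [List.length_cons] at hn
    have hL : ((x :: y :: z :: rest).length : Int) - 1 = ((y :: z :: rest).length : Int) := by
      simp
    rw [isOneBitCharacter, isOneBitCharacterGo, hL]
    rw [dif_pos (by simp only [List.length_cons]; push_cast; omega),
      if_pos (by simp only [List.length_cons]; push_cast; omega), PySem.List.pyGet?_zero_cons]
    by_cases hx : x = 0
    · subst hx
      rw [if_pos rfl, show (0 : Int) + 1 = 0 + 1 from rfl,
        aGo_shift 0 (y :: z :: rest) _ 0 (by omega)]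
      have hA : isOneBitCharacterGo (y :: z :: rest) (((y :: z :: rest).length : Int) - 1) 0
          = isOneBitCharacter (y :: z :: rest) := rfl
      rw [hA, ih (y :: z :: rest).length (by simp; omega) _ rfl,
        gForm_cons_zero _ (by simp)]
    · rw [if_neg (by simp [hx]), show (0 : Int) + 2 = (0 + 1) + 1 by ring,
        aGo_shift x (y :: z :: rest) _ (0 + 1) (by omega),
        show ((y :: z :: rest).length : Int) - 1 = ((z :: rest).length : Int) by simp,
        aGo_shift y (z :: rest) _ 0 (by omega)]
      have hA : isOneBitCharacterGo (z :: rest) (((z :: rest).length : Int) - 1) 0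
          = isOneBitCharacter (z :: rest) := rfl
      rw [hA, ih (z :: rest).length (by simp; omega) _ rfl,
        gForm_cons_ne x y (z :: rest) hx (by simp)]

-- B equals the closed form
lemma b_eq_gForm (bits : List Int) : isOneBitCharacter_alt bits = gForm bits := by
  rw [isOneBitCharacter_alt, gForm]
  by_cases h : (bits.length : Int) < 2
  · rw [if_pos h, if_pos (by omega)]
  · rw [if_neg h, if_neg (by omega)]
    have hj : bits.length - 2 ≤ bits.length := by omega
    have e1 : ((bits.length - 2 : ℕ) : Int) - 1 = (bits.length : Int) - 3 := by omega
    have e2 : (bits.take (bits.length - 2)).reverse = bits.reverse.drop 2 := by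
      rw [List.reverse_take]
      congr 1
      omega
    have hk : isOneBitCharacterAltGo bits ((bits.length : Int) - 3) 0
        = (cntF (bits.reverse.drop 2) : Int) := by
      rw [← e1, bGo_cnt bits _ hj 0, e2, zero_add]
    simp only [hk]
    rw [PySem.Int.mod_eq_emod_of_pos (by norm_num)]
    congr 1
    by_cases hc : cntF (bits.reverse.drop 2) % 2 = 1
    · simp [hc, show ((cntF (bits.reverse.drop 2) : Int) % 2 = 1) from by omega]
    · simp [hc, show ¬((cntF (bits.reverse.drop 2) : Int) % 2 = 1) from by omega]

-- ===== VERDICT (by name: the statement is the Claim_ definition above) =====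
theorem isOneBitCharacter_spec : Claim_equal_isOneBitCharacter := by
  intro bits _
  unfold Spec_isOneBitCharacter
  rw [a_eq_gForm, b_eq_gForm]
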